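-- pv_equiv track=rewrite | github.com/ambrosia2024/dashboard | pidrive/pi_helper.py | _detect_archive_kind
-- ===== SOURCE A (Python) =====
-- import posixpath
--
-- def _detect_archive_kind(path: str) -> str | None:
--     """
--     Best-effort archive kind detection by extension (lowercased).
--     Returns one of: 'zip','7z','rar','tar','tar.gz','tar.bz2','tar.xz','gz','bz2','xz', or None.
--     """
--     name = posixpath.basename(path).lower()
--
--     # Common tar+compress combos first
--     combos = {
--         ('.tar.gz', '.tgz'): 'tar.gz',
--         ('.tar.bz2', '.tbz2'): 'tar.bz2',
--         ('.tar.xz', '.txz'): 'tar.xz',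
--     }
--     for exts, kind in combos.items():
--         if any(name.endswith(ext) for ext in exts):
--             return kind
--
--     # Singles (order matters for .gz vs .tar.gz — already handled above)
--     if name.endswith('.zip'):
--         return 'zip'
--     if name.endswith('.7z'):
--         return '7z'
--     if name.endswith('.rar'):
--         return 'rar'
--     if name.endswith('.tar'):
--         return 'tar'
--     if name.endswith('.gz'):
--         return 'gz'  # single-file gzip, not tarball
--     if name.endswith('.bz2'):
--         return 'bz2'
--     if name.endswith('.xz'):
--         return 'xz'
--     return None
-- ===== SOURCE B (Python) =====
-- # one flat suffix table; the answer is the kind of the LONGEST matching suffix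
-- _TABLE = [
--     ('.tar.bz2', 'tar.bz2'),
--     ('.tar.gz', 'tar.gz'),
--     ('.tar.xz', 'tar.xz'),
--     ('.tbz2', 'tar.bz2'),
--     ('.tgz', 'tar.gz'),
--     ('.txz', 'tar.xz'),
--     ('.zip', 'zip'),
--     ('.rar', 'rar'),
--     ('.tar', 'tar'),
--     ('.bz2', 'bz2'),
--     ('.7z', '7z'),
--     ('.gz', 'gz'),
--     ('.xz', 'xz'),
-- ]
--
-- def _detect_archive_kind(path: str) -> str | None:
--     name = path[path.rfind('/') + 1:].lower()  # posixpath.basename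
--     best = None  # (length of suffix, kind) of the longest matching suffix so far
--     for suffix, kind in _TABLE:
--         if name.endswith(suffix) and (best is None or best[0] < len(suffix)):
--             best = (len(suffix), kind)
--     return best[1] if best is not None else None
-- ===== Notes on version B (the rewrite author's own statement) =====
-- stated objective: alternative
-- what changed: Replaced the hand-ordered cascade of endswith branches (combos dict first, then singles) by a single flat suffix->kind table resolved by longest-matching-suffix selection in one fold.
import Mathlib
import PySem

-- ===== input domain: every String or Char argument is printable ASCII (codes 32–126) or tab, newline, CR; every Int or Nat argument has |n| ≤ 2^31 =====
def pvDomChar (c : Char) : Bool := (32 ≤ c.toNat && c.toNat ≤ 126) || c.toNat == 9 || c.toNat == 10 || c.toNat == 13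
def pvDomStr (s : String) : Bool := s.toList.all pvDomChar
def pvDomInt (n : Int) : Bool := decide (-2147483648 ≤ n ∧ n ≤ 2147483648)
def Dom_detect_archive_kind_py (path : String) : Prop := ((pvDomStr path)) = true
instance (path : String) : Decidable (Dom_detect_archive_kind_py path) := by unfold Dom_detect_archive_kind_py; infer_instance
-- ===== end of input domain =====

-- B replaces A's hand-ordered cascade of endswith branches by a flat suffix table
-- resolved by longest-suffix match (objective: alternative decomposition, same cost).

-- ===== PORT A =====
-- posixpath.basename(path): the part of the string after the last '/' (exact for POSIX paths;
-- ported by hand as a left fold that restarts the accumulator at every '/').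
def pyBasename (cs : List Char) : List Char :=
  cs.foldl (fun acc c => if c = '/' then [] else acc ++ [c]) []

-- the if/endswith cascade of A applied to the lowercased basename `name`
-- (the combos-dict loop unrolled in its insertion order, then the singles in A's order)
def aCascade (name : List Char) : Option String :=
  if PySem.Chars.endswith name ".tar.gz".toList || PySem.Chars.endswith name ".tgz".toList then
    some "tar.gz"
  else if PySem.Chars.endswith name ".tar.bz2".toList || PySem.Chars.endswith name ".tbz2".toList then
    some "tar.bz2"
  else if PySem.Chars.endswith name ".tar.xz".toList || PySem.Chars.endswith name ".txz".toList then
    some "tar.xz"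
  else if PySem.Chars.endswith name ".zip".toList then some "zip"
  else if PySem.Chars.endswith name ".7z".toList then some "7z"
  else if PySem.Chars.endswith name ".rar".toList then some "rar"
  else if PySem.Chars.endswith name ".tar".toList then some "tar"
  else if PySem.Chars.endswith name ".gz".toList then some "gz"
  else if PySem.Chars.endswith name ".bz2".toList then some "bz2"
  else if PySem.Chars.endswith name ".xz".toList then some "xz"
  else none

def detect_archive_kind_py (path : String) : Option String :=
  aCascade (PySem.Chars.lower (pyBasename path.toList))

-- ===== PORT B =====
def pvTable : List (List Char × String) :=
  [(".tar.bz2".toList, "tar.bz2"), (".tar.gz".toList, "tar.gz"), (".tar.xz".toList, "tar.xz"),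
   (".tbz2".toList, "tar.bz2"), (".tgz".toList, "tar.gz"), (".txz".toList, "tar.xz"),
   (".zip".toList, "zip"), (".rar".toList, "rar"), (".tar".toList, "tar"),
   (".bz2".toList, "bz2"), (".7z".toList, "7z"), (".gz".toList, "gz"), (".xz".toList, "xz")]

-- B's loop: keep (length, kind) of the longest matching table suffix seen so far
def bBest (name : List Char) : Option String :=
  (pvTable.foldl
    (fun (best : Option (Nat × String)) e =>
      if PySem.Chars.endswith name e.1 &&
         (match best with | none => true | some b => decide (b.1 < e.1.length)) then
        some (e.1.length, e.2)
      else best)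
    none).map Prod.snd

def detect_archive_kind_py_alt (path : String) : Option String :=
  bBest (PySem.Chars.lower (pyBasename path.toList))

-- ===== PRECONDITION & SPEC =====
def Spec_detect_archive_kind_py (path : String) (out : Option String) : Prop := out = detect_archive_kind_py_alt path
instance (path : String) (out : Option String) : Decidable (Spec_detect_archive_kind_py path out) := by unfold Spec_detect_archive_kind_py; infer_instance

-- ===== CLAIM (what is proved, stated in full; the proofs are below) =====
def Claim_equal_detect_archive_kind_py : Prop := ∀ (path : String), Dom_detect_archive_kind_py path → Spec_detect_archive_kind_py path (detect_archive_kind_py path)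

-- ===== LEMMAS AND PROOFS =====

-- If `a` is a suffix of `l` and `b` is no longer than `a`, then `l` ends with `b`
-- exactly when `a` ends with `b` (so every shorter endswith test is decided by `a`).
theorem ends_det {l a b : List Char} (h : PySem.Chars.endswith l a = true)
    (hlen : b.length ≤ a.length) :
    PySem.Chars.endswith l b = PySem.Chars.endswith a b := by
  have ha : a <:+ l := (PySem.Chars.endswith_iff l a).1 h
  by_cases hb : PySem.Chars.endswith l b = true
  · have hba : b <:+ a :=
      List.suffix_of_suffix_length_le ((PySem.Chars.endswith_iff l b).1 hb) ha hlen
    rw [hb, eq_comm]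
    exact (PySem.Chars.endswith_iff a b).2 hba
  · rw [Bool.not_eq_true] at hb
    rw [hb, eq_comm]
    rw [Bool.eq_false_iff]
    intro hab
    have : b <:+ l := ((PySem.Chars.endswith_iff a b).1 hab).trans ha
    rw [(PySem.Chars.endswith_iff l b).2 this] at hb
    exact Bool.true_eq_false.mp hb

-- A's cascade and B's longest-suffix fold agree on every candidate name.
theorem key_eq (name : List Char) : aCascade name = bBest name := by
  by_cases h0 : PySem.Chars.endswith name ['.', 't', 'a', 'r', '.', 'b', 'z', '2'] = true
  case pos =>
    have h1 : PySem.Chars.endswith name ['.', 't', 'a', 'r', '.', 'g', 'z'] = false := (ends_det h0 (by decide)).trans (by decide)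
    have h2 : PySem.Chars.endswith name ['.', 't', 'a', 'r', '.', 'x', 'z'] = false := (ends_det h0 (by decide)).trans (by decide)
    have h3 : PySem.Chars.endswith name ['.', 't', 'b', 'z', '2'] = false := (ends_det h0 (by decide)).trans (by decide)
    have h4 : PySem.Chars.endswith name ['.', 't', 'g', 'z'] = false := (ends_det h0 (by decide)).trans (by decide)
    have h5 : PySem.Chars.endswith name ['.', 't', 'x', 'z'] = false := (ends_det h0 (by decide)).trans (by decide)
    have h6 : PySem.Chars.endswith name ['.', 'z', 'i', 'p'] = false := (ends_det h0 (by decide)).trans (by decide)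
    have h7 : PySem.Chars.endswith name ['.', 'r', 'a', 'r'] = false := (ends_det h0 (by decide)).trans (by decide)
    have h8 : PySem.Chars.endswith name ['.', 't', 'a', 'r'] = false := (ends_det h0 (by decide)).trans (by decide)
    have h9 : PySem.Chars.endswith name ['.', 'b', 'z', '2'] = true := (ends_det h0 (by decide)).trans (by decide)
    have h10 : PySem.Chars.endswith name ['.', '7', 'z'] = false := (ends_det h0 (by decide)).trans (by decide)
    have h11 : PySem.Chars.endswith name ['.', 'g', 'z'] = false := (ends_det h0 (by decide)).trans (by decide)
    have h12 : PySem.Chars.endswith name ['.', 'x', 'z'] = false := (ends_det h0 (by decide)).trans (by decide)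
    simp [aCascade, bBest, pvTable, h0, h1, h2, h3, h4, h5, h6, h7, h8, h9, h10, h11, h12]
  rw [Bool.not_eq_true] at h0
  by_cases h1 : PySem.Chars.endswith name ['.', 't', 'a', 'r', '.', 'g', 'z'] = true
  case pos =>
    have h2 : PySem.Chars.endswith name ['.', 't', 'a', 'r', '.', 'x', 'z'] = false := (ends_det h1 (by decide)).trans (by decide)
    have h3 : PySem.Chars.endswith name ['.', 't', 'b', 'z', '2'] = false := (ends_det h1 (by decide)).trans (by decide)
    have h4 : PySem.Chars.endswith name ['.', 't', 'g', 'z'] = false := (ends_det h1 (by decide)).trans (by decide)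
    have h5 : PySem.Chars.endswith name ['.', 't', 'x', 'z'] = false := (ends_det h1 (by decide)).trans (by decide)
    have h6 : PySem.Chars.endswith name ['.', 'z', 'i', 'p'] = false := (ends_det h1 (by decide)).trans (by decide)
    have h7 : PySem.Chars.endswith name ['.', 'r', 'a', 'r'] = false := (ends_det h1 (by decide)).trans (by decide)
    have h8 : PySem.Chars.endswith name ['.', 't', 'a', 'r'] = false := (ends_det h1 (by decide)).trans (by decide)
    have h9 : PySem.Chars.endswith name ['.', 'b', 'z', '2'] = false := (ends_det h1 (by decide)).trans (by decide)
    have h10 : PySem.Chars.endswith name ['.', '7', 'z'] = false := (ends_det h1 (by decide)).trans (by decide)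
    have h11 : PySem.Chars.endswith name ['.', 'g', 'z'] = true := (ends_det h1 (by decide)).trans (by decide)
    have h12 : PySem.Chars.endswith name ['.', 'x', 'z'] = false := (ends_det h1 (by decide)).trans (by decide)
    simp [aCascade, bBest, pvTable, h1, h0, h2, h3, h4, h5, h6, h7, h8, h9, h10, h11, h12]
  rw [Bool.not_eq_true] at h1
  by_cases h2 : PySem.Chars.endswith name ['.', 't', 'a', 'r', '.', 'x', 'z'] = true
  case pos =>
    have h3 : PySem.Chars.endswith name ['.', 't', 'b', 'z', '2'] = false := (ends_det h2 (by decide)).trans (by decide)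
    have h4 : PySem.Chars.endswith name ['.', 't', 'g', 'z'] = false := (ends_det h2 (by decide)).trans (by decide)
    have h5 : PySem.Chars.endswith name ['.', 't', 'x', 'z'] = false := (ends_det h2 (by decide)).trans (by decide)
    have h6 : PySem.Chars.endswith name ['.', 'z', 'i', 'p'] = false := (ends_det h2 (by decide)).trans (by decide)
    have h7 : PySem.Chars.endswith name ['.', 'r', 'a', 'r'] = false := (ends_det h2 (by decide)).trans (by decide)
    have h8 : PySem.Chars.endswith name ['.', 't', 'a', 'r'] = false := (ends_det h2 (by decide)).trans (by decide)
    have h9 : PySem.Chars.endswith name ['.', 'b', 'z', '2'] = false := (ends_det h2 (by decide)).trans (by decide)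
    have h10 : PySem.Chars.endswith name ['.', '7', 'z'] = false := (ends_det h2 (by decide)).trans (by decide)
    have h11 : PySem.Chars.endswith name ['.', 'g', 'z'] = false := (ends_det h2 (by decide)).trans (by decide)
    have h12 : PySem.Chars.endswith name ['.', 'x', 'z'] = true := (ends_det h2 (by decide)).trans (by decide)
    simp [aCascade, bBest, pvTable, h2, h0, h1, h3, h4, h5, h6, h7, h8, h9, h10, h11, h12]
  rw [Bool.not_eq_true] at h2
  by_cases h3 : PySem.Chars.endswith name ['.', 't', 'b', 'z', '2'] = true
  case pos =>
    have h4 : PySem.Chars.endswith name ['.', 't', 'g', 'z'] = false := (ends_det h3 (by decide)).trans (by decide)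
    have h5 : PySem.Chars.endswith name ['.', 't', 'x', 'z'] = false := (ends_det h3 (by decide)).trans (by decide)
    have h6 : PySem.Chars.endswith name ['.', 'z', 'i', 'p'] = false := (ends_det h3 (by decide)).trans (by decide)
    have h7 : PySem.Chars.endswith name ['.', 'r', 'a', 'r'] = false := (ends_det h3 (by decide)).trans (by decide)
    have h8 : PySem.Chars.endswith name ['.', 't', 'a', 'r'] = false := (ends_det h3 (by decide)).trans (by decide)
    have h9 : PySem.Chars.endswith name ['.', 'b', 'z', '2'] = false := (ends_det h3 (by decide)).trans (by decide)
    have h10 : PySem.Chars.endswith name ['.', '7', 'z'] = false := (ends_det h3 (by decide)).trans (by decide)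
    have h11 : PySem.Chars.endswith name ['.', 'g', 'z'] = false := (ends_det h3 (by decide)).trans (by decide)
    have h12 : PySem.Chars.endswith name ['.', 'x', 'z'] = false := (ends_det h3 (by decide)).trans (by decide)
    simp [aCascade, bBest, pvTable, h3, h0, h1, h2, h4, h5, h6, h7, h8, h9, h10, h11, h12]
  rw [Bool.not_eq_true] at h3
  by_cases h4 : PySem.Chars.endswith name ['.', 't', 'g', 'z'] = true
  case pos =>
    have h5 : PySem.Chars.endswith name ['.', 't', 'x', 'z'] = false := (ends_det h4 (by decide)).trans (by decide)
    have h6 : PySem.Chars.endswith name ['.', 'z', 'i', 'p'] = false := (ends_det h4 (by decide)).trans (by decide)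
    have h7 : PySem.Chars.endswith name ['.', 'r', 'a', 'r'] = false := (ends_det h4 (by decide)).trans (by decide)
    have h8 : PySem.Chars.endswith name ['.', 't', 'a', 'r'] = false := (ends_det h4 (by decide)).trans (by decide)
    have h9 : PySem.Chars.endswith name ['.', 'b', 'z', '2'] = false := (ends_det h4 (by decide)).trans (by decide)
    have h10 : PySem.Chars.endswith name ['.', '7', 'z'] = false := (ends_det h4 (by decide)).trans (by decide)
    have h11 : PySem.Chars.endswith name ['.', 'g', 'z'] = false := (ends_det h4 (by decide)).trans (by decide)
    have h12 : PySem.Chars.endswith name ['.', 'x', 'z'] = false := (ends_det h4 (by decide)).trans (by decide)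
    simp [aCascade, bBest, pvTable, h4, h0, h1, h2, h3, h5, h6, h7, h8, h9, h10, h11, h12]
  rw [Bool.not_eq_true] at h4
  by_cases h5 : PySem.Chars.endswith name ['.', 't', 'x', 'z'] = true
  case pos =>
    have h6 : PySem.Chars.endswith name ['.', 'z', 'i', 'p'] = false := (ends_det h5 (by decide)).trans (by decide)
    have h7 : PySem.Chars.endswith name ['.', 'r', 'a', 'r'] = false := (ends_det h5 (by decide)).trans (by decide)
    have h8 : PySem.Chars.endswith name ['.', 't', 'a', 'r'] = false := (ends_det h5 (by decide)).trans (by decide)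
    have h9 : PySem.Chars.endswith name ['.', 'b', 'z', '2'] = false := (ends_det h5 (by decide)).trans (by decide)
    have h10 : PySem.Chars.endswith name ['.', '7', 'z'] = false := (ends_det h5 (by decide)).trans (by decide)
    have h11 : PySem.Chars.endswith name ['.', 'g', 'z'] = false := (ends_det h5 (by decide)).trans (by decide)
    have h12 : PySem.Chars.endswith name ['.', 'x', 'z'] = false := (ends_det h5 (by decide)).trans (by decide)
    simp [aCascade, bBest, pvTable, h5, h0, h1, h2, h3, h4, h6, h7, h8, h9, h10, h11, h12]
  rw [Bool.not_eq_true] at h5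
  by_cases h6 : PySem.Chars.endswith name ['.', 'z', 'i', 'p'] = true
  case pos =>
    have h7 : PySem.Chars.endswith name ['.', 'r', 'a', 'r'] = false := (ends_det h6 (by decide)).trans (by decide)
    have h8 : PySem.Chars.endswith name ['.', 't', 'a', 'r'] = false := (ends_det h6 (by decide)).trans (by decide)
    have h9 : PySem.Chars.endswith name ['.', 'b', 'z', '2'] = false := (ends_det h6 (by decide)).trans (by decide)
    have h10 : PySem.Chars.endswith name ['.', '7', 'z'] = false := (ends_det h6 (by decide)).trans (by decide)
    have h11 : PySem.Chars.endswith name ['.', 'g', 'z'] = false := (ends_det h6 (by decide)).trans (by decide)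
    have h12 : PySem.Chars.endswith name ['.', 'x', 'z'] = false := (ends_det h6 (by decide)).trans (by decide)
    simp [aCascade, bBest, pvTable, h6, h0, h1, h2, h3, h4, h5, h7, h8, h9, h10, h11, h12]
  rw [Bool.not_eq_true] at h6
  by_cases h7 : PySem.Chars.endswith name ['.', 'r', 'a', 'r'] = true
  case pos =>
    have h8 : PySem.Chars.endswith name ['.', 't', 'a', 'r'] = false := (ends_det h7 (by decide)).trans (by decide)
    have h9 : PySem.Chars.endswith name ['.', 'b', 'z', '2'] = false := (ends_det h7 (by decide)).trans (by decide)
    have h10 : PySem.Chars.endswith name ['.', '7', 'z'] = false := (ends_det h7 (by decide)).trans (by decide)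
    have h11 : PySem.Chars.endswith name ['.', 'g', 'z'] = false := (ends_det h7 (by decide)).trans (by decide)
    have h12 : PySem.Chars.endswith name ['.', 'x', 'z'] = false := (ends_det h7 (by decide)).trans (by decide)
    simp [aCascade, bBest, pvTable, h7, h0, h1, h2, h3, h4, h5, h6, h8, h9, h10, h11, h12]
  rw [Bool.not_eq_true] at h7
  by_cases h8 : PySem.Chars.endswith name ['.', 't', 'a', 'r'] = true
  case pos =>
    have h9 : PySem.Chars.endswith name ['.', 'b', 'z', '2'] = false := (ends_det h8 (by decide)).trans (by decide)
    have h10 : PySem.Chars.endswith name ['.', '7', 'z'] = false := (ends_det h8 (by decide)).trans (by decide)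
    have h11 : PySem.Chars.endswith name ['.', 'g', 'z'] = false := (ends_det h8 (by decide)).trans (by decide)
    have h12 : PySem.Chars.endswith name ['.', 'x', 'z'] = false := (ends_det h8 (by decide)).trans (by decide)
    simp [aCascade, bBest, pvTable, h8, h0, h1, h2, h3, h4, h5, h6, h7, h9, h10, h11, h12]
  rw [Bool.not_eq_true] at h8
  by_cases h9 : PySem.Chars.endswith name ['.', 'b', 'z', '2'] = true
  case pos =>
    have h10 : PySem.Chars.endswith name ['.', '7', 'z'] = false := (ends_det h9 (by decide)).trans (by decide)
    have h11 : PySem.Chars.endswith name ['.', 'g', 'z'] = false := (ends_det h9 (by decide)).trans (by decide)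
    have h12 : PySem.Chars.endswith name ['.', 'x', 'z'] = false := (ends_det h9 (by decide)).trans (by decide)
    simp [aCascade, bBest, pvTable, h9, h0, h1, h2, h3, h4, h5, h6, h7, h8, h10, h11, h12]
  rw [Bool.not_eq_true] at h9
  by_cases h10 : PySem.Chars.endswith name ['.', '7', 'z'] = true
  case pos =>
    have h11 : PySem.Chars.endswith name ['.', 'g', 'z'] = false := (ends_det h10 (by decide)).trans (by decide)
    have h12 : PySem.Chars.endswith name ['.', 'x', 'z'] = false := (ends_det h10 (by decide)).trans (by decide)
    simp [aCascade, bBest, pvTable, h10, h0, h1, h2, h3, h4, h5, h6, h7, h8, h9, h11, h12]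
  rw [Bool.not_eq_true] at h10
  by_cases h11 : PySem.Chars.endswith name ['.', 'g', 'z'] = true
  case pos =>
    have h12 : PySem.Chars.endswith name ['.', 'x', 'z'] = false := (ends_det h11 (by decide)).trans (by decide)
    simp [aCascade, bBest, pvTable, h11, h0, h1, h2, h3, h4, h5, h6, h7, h8, h9, h10, h12]
  rw [Bool.not_eq_true] at h11
  by_cases h12 : PySem.Chars.endswith name ['.', 'x', 'z'] = true
  case pos =>
    simp [aCascade, bBest, pvTable, h12, h0, h1, h2, h3, h4, h5, h6, h7, h8, h9, h10, h11]
  rw [Bool.not_eq_true] at h12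
  simp [aCascade, bBest, pvTable, h0, h1, h2, h3, h4, h5, h6, h7, h8, h9, h10, h11, h12]


-- ===== VERDICT (by name: the statement is the Claim_ definition above) =====
theorem detect_archive_kind_py_spec : Claim_equal_detect_archive_kind_py := by
  intro path _
  unfold Spec_detect_archive_kind_py detect_archive_kind_py detect_archive_kind_py_alt
  exact key_eq _
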